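-- pv_equiv track=rewrite | github.com/prophetfromai/journal | src/community/agents/topic_extractor.py | _find_related_topics
-- ===== SOURCE A (Python) =====
-- from typing import List, Dict, Any
--
-- def _find_related_topics(topic: str, all_topics: List[str]) -> set:
--     """Find topics that are related to the given topic."""
--     related = set()
--     words = set(topic.split())
--
--     for other in all_topics:
--         if other == topic:
--             continue
--
--         other_words = set(other.split())
--
--         # Check for word overlap
--         if words & other_words:
--             related.add(other)
--         # Check if one is a substring of the other
--         elif topic in other or other in topic:
--             related.add(other)
--
--     return related
-- ===== SOURCE B (Python) =====
-- def _find_related_topics(topic, all_topics):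
--     """Find topics that are related to the given topic."""
--     # inverted index: word -> set of topics whose split contains it
--     index = {}
--     for other in all_topics:
--         for w in other.split():
--             index.setdefault(w, set()).add(other)
--     word_hits = set()
--     for w in topic.split():
--         word_hits |= index.get(w, set())
--     related = set()
--     for other in all_topics:
--         if other != topic and (other in word_hits or topic in other or other in topic):
--             related.add(other)
--     return related
-- ===== Notes on version B (the rewrite author's own statement) =====
-- stated objective: alternative
-- what changed: Replaces the per-topic word-set intersection by an inverted index (word -> set of topics containing it) built once, unions the index entries for the query's words into a hit set, and then does a single membership/substring pass over all_topics.
import Mathlib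
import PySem

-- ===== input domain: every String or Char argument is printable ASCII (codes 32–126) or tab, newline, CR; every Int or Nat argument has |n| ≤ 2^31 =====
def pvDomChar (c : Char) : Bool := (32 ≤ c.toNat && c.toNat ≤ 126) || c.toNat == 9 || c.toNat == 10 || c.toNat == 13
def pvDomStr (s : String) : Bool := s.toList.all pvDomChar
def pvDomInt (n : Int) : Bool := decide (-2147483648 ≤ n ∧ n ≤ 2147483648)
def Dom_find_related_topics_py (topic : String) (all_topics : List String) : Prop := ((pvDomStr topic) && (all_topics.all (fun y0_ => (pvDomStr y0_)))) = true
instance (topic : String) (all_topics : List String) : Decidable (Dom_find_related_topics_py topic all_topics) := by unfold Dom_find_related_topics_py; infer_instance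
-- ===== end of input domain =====

-- B replaces A's per-topic word-set intersection by an inverted index (word -> set of topics)
-- built once, a union of index entries for the query's words, and one membership/substring pass
-- (an alternative decomposition; return value proved equal, no speed claim).

-- ===== PORT A =====
def find_related_topics_py (topic : String) (all_topics : List String) : List String :=
  let words : PySem.Set String := PySem.Set.ofList (PySem.Str.split₀ topic)
  all_topics.foldl (fun related other =>
    if other == topic then related
    else
      let other_words : PySem.Set String := PySem.Set.ofList (PySem.Str.split₀ other)
      if PySem.Set.inter words other_words ≠ [] then PySem.Set.add related other
      else if PySem.Str.isIn topic other || PySem.Str.isIn other topic then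
        PySem.Set.add related other
      else related) PySem.Set.empty

-- ===== PORT B =====
-- B-side helpers: the inverted index and the word-hit set (Source B's first two loops)
def pvIndex (all_topics : List String) : PySem.Dict String (PySem.Set String) :=
  all_topics.foldl (fun d other =>
    (PySem.Str.split₀ other).foldl
      (fun d w => d.modify w [] (fun s => PySem.Set.add s other)) d) PySem.Dict.empty

def pvWordHits (topic : String) (all_topics : List String) : PySem.Set String :=
  (PySem.Str.split₀ topic).foldl
    (fun s w => PySem.Set.union s ((pvIndex all_topics).getD w [])) PySem.Set.empty

def find_related_topics_py_alt (topic : String) (all_topics : List String) : List String :=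
  all_topics.foldl (fun related other =>
    if other != topic &&
        (PySem.Set.contains (pvWordHits topic all_topics) other || PySem.Str.isIn topic other
          || PySem.Str.isIn other topic) then
      PySem.Set.add related other
    else related) PySem.Set.empty

-- ===== PRECONDITION & SPEC =====
def Spec_find_related_topics_py (topic : String) (all_topics : List String) (out : List String) : Prop := out = find_related_topics_py_alt topic all_topics
instance (topic : String) (all_topics : List String) (out : List String) : Decidable (Spec_find_related_topics_py topic all_topics out) := by unfold Spec_find_related_topics_py; infer_instance

-- ===== CLAIM (what is proved, stated in full; the proofs are below) =====
def Claim_equal_find_related_topics_py : Prop := ∀ (topic : String) (all_topics : List String), Dom_find_related_topics_py topic all_topics → Spec_find_related_topics_py topic all_topics (find_related_topics_py topic all_topics)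

-- ===== LEMMAS AND PROOFS =====

-- inner loop of the index build: one topic t added under each of its words
theorem mem_getD_wordsFold (ws : List String) (d : PySem.Dict String (PySem.Set String))
    (t w x : String) :
    x ∈ (ws.foldl (fun d w => d.modify w [] (fun s => PySem.Set.add s t)) d).getD w [] ↔
      x ∈ d.getD w [] ∨ (x = t ∧ w ∈ ws) := by
  induction ws generalizing d with
  | nil => simp
  | cons a rest ih =>
    simp only [List.foldl_cons, ih, PySem.Dict.getD_modify, List.mem_cons]
    by_cases h : w = a
    · subst h; simp [PySem.Set.mem_add]; tauto
    · simp [h]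

-- the inverted index maps w to exactly the topics whose split contains w
theorem mem_getD_indexFold (ts : List String) (d : PySem.Dict String (PySem.Set String))
    (w x : String) :
    x ∈ (ts.foldl (fun d other =>
          (PySem.Str.split₀ other).foldl
            (fun d w => d.modify w [] (fun s => PySem.Set.add s other)) d) d).getD w [] ↔
      x ∈ d.getD w [] ∨ ∃ t ∈ ts, x = t ∧ w ∈ PySem.Str.split₀ t := by
  induction ts generalizing d with
  | nil => simp
  | cons a rest ih =>
    simp only [List.foldl_cons, ih, mem_getD_wordsFold, List.mem_cons]
    constructor
    · rintro ((h | ⟨hx, hw⟩) | ⟨t, ht, hx, hw⟩)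
      · exact Or.inl h
      · exact Or.inr ⟨a, Or.inl rfl, hx, hw⟩
      · exact Or.inr ⟨t, Or.inr ht, hx, hw⟩
    · rintro (h | ⟨t, (ht | ht), hx, hw⟩)
      · exact Or.inl (Or.inl h)
      · subst ht; exact Or.inl (Or.inr ⟨hx, hw⟩)
      · exact Or.inr ⟨t, ht, hx, hw⟩

-- the union loop: membership in the accumulated hit set
theorem mem_unionFold (ws : List String) (idx : PySem.Dict String (PySem.Set String))
    (s0 : PySem.Set String) (x : String) :
    x ∈ ws.foldl (fun s w => PySem.Set.union s (idx.getD w [])) s0 ↔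
      x ∈ s0 ∨ ∃ w ∈ ws, x ∈ idx.getD w [] := by
  induction ws generalizing s0 with
  | nil => simp
  | cons a rest ih =>
    simp only [List.foldl_cons, ih, PySem.Set.mem_union, List.mem_cons]
    constructor
    · rintro ((h | h) | ⟨w, hw, hx⟩)
      · exact Or.inl h
      · exact Or.inr ⟨a, Or.inl rfl, h⟩
      · exact Or.inr ⟨w, Or.inr hw, hx⟩
    · rintro (h | ⟨w, (hw | hw), hx⟩)
      · exact Or.inl (Or.inl h)
      · subst hw; exact Or.inl (Or.inr hx)
      · exact Or.inr ⟨w, hw, hx⟩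

-- characterisation of B's hit set
theorem contains_wordHits (topic : String) (all_topics : List String) (other : String) :
    PySem.Set.contains (pvWordHits topic all_topics) other = true ↔
      other ∈ all_topics ∧ ∃ w ∈ PySem.Str.split₀ topic, w ∈ PySem.Str.split₀ other := by
  unfold pvWordHits pvIndex
  rw [PySem.Set.contains_iff, mem_unionFold]
  constructor
  · rintro (h | ⟨w, hw, hx⟩)
    · simp [PySem.Set.empty] at h
    · rw [mem_getD_indexFold] at hx
      rcases hx with h | ⟨t, ht, hxt, hwt⟩
      · simp [PySem.Dict.getD, PySem.Dict.get?, PySem.Dict.empty] at h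
      · subst hxt; exact ⟨ht, w, hw, hwt⟩
  · rintro ⟨hmem, w, hw, hwo⟩
    refine Or.inr ⟨w, hw, ?_⟩
    rw [mem_getD_indexFold]
    exact Or.inr ⟨other, hmem, rfl, hwo⟩

-- A's truthiness test on the intersection, as an existential
theorem inter_ne_nil_iff (xs ys : List String) :
    PySem.Set.inter (PySem.Set.ofList xs) (PySem.Set.ofList ys) ≠ [] ↔
      ∃ w ∈ xs, w ∈ ys := by
  constructor
  · intro h
    obtain ⟨w, hw⟩ := List.exists_mem_of_ne_nil _ h
    rw [PySem.Set.mem_inter, PySem.Set.mem_ofList, PySem.Set.mem_ofList] at hw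
    exact ⟨w, hw.1, hw.2⟩
  · rintro ⟨w, h1, h2⟩ hnil
    have : w ∈ PySem.Set.inter (PySem.Set.ofList xs) (PySem.Set.ofList ys) := by
      rw [PySem.Set.mem_inter, PySem.Set.mem_ofList, PySem.Set.mem_ofList]; exact ⟨h1, h2⟩
    simp [hnil] at this

-- ===== VERDICT (by name: the statement is the Claim_ definition above) =====
theorem find_related_topics_py_spec : Claim_equal_find_related_topics_py := by
  intro topic all_topics _
  unfold Spec_find_related_topics_py find_related_topics_py find_related_topics_py_alt
  apply PySem.List.foldl_congr_mem
  intro related other hmem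
  by_cases heq : other = topic
  · simp [heq]
  · by_cases hov : ∃ w ∈ PySem.Str.split₀ topic, w ∈ PySem.Str.split₀ other
    · have h1 : PySem.Set.inter (PySem.Set.ofList (PySem.Str.split₀ topic))
          (PySem.Set.ofList (PySem.Str.split₀ other)) ≠ [] := (inter_ne_nil_iff _ _).2 hov
      have h2 : other ∈ pvWordHits topic all_topics :=
        (PySem.Set.contains_iff _ _).1 ((contains_wordHits topic all_topics other).2 ⟨hmem, hov⟩)
      simp [heq, h1, h2]
    · have h1 : PySem.Set.inter (PySem.Set.ofList (PySem.Str.split₀ topic))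
          (PySem.Set.ofList (PySem.Str.split₀ other)) = [] :=
        not_not.1 (fun h => hov ((inter_ne_nil_iff _ _).1 h))
      have h2 : other ∉ pvWordHits topic all_topics := by
        intro h
        exact hov ((contains_wordHits topic all_topics other).1
          ((PySem.Set.contains_iff _ _).2 h)).2
      simp [heq, h1, h2]
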